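-- pv_equiv track=rewrite | github.com/bkawk/harness-lab | src/harness_lab/science_eval.py | _smoke_primary_failure
-- ===== SOURCE A (Python) =====
-- def _smoke_primary_failure(smoke_failure_reasons: list[str]) -> str:
--     if any(reason.startswith("boundary_smoke:boundary_f1_too_low") for reason in smoke_failure_reasons):
--         return "boundary_transfer_weak"
--     if any(reason.startswith("hard_transfer_smoke:gap_too_wide") for reason in smoke_failure_reasons):
--         return "hard_transfer_regression"
--     if any(reason.startswith("boundary_smoke:gap_too_wide") for reason in smoke_failure_reasons):
--         return "boundary_transfer_regression"
--     if any(reason.startswith("transfer_smoke:gap_too_wide") for reason in smoke_failure_reasons):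
--         return "transfer_smoke_gap_too_wide"
--     if any(reason.endswith(":score_below_floor") for reason in smoke_failure_reasons):
--         return "transfer_smoke_score_below_floor"
--     return "transfer_smoke_failed"
-- ===== SOURCE B (Python) =====
-- _PAIRS = [
--     (lambda r: r.startswith("boundary_smoke:boundary_f1_too_low"), "boundary_transfer_weak"),
--     (lambda r: r.startswith("hard_transfer_smoke:gap_too_wide"), "hard_transfer_regression"),
--     (lambda r: r.startswith("boundary_smoke:gap_too_wide"), "boundary_transfer_regression"),
--     (lambda r: r.startswith("transfer_smoke:gap_too_wide"), "transfer_smoke_gap_too_wide"),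
--     (lambda r: r.endswith(":score_below_floor"), "transfer_smoke_score_below_floor"),
-- ]
--
--
-- def _first_match_index(reason):
--     i = 0
--     for pred, _label in _PAIRS:
--         if pred(reason):
--             return i
--         i += 1
--     return i
--
--
-- def _smoke_primary_failure(smoke_failure_reasons: list[str]) -> str:
--     best = len(_PAIRS)
--     for reason in smoke_failure_reasons:
--         idx = _first_match_index(reason)
--         if idx < best:
--             best = idx
--     if best < len(_PAIRS):
--         return _PAIRS[best][1]
--     return "transfer_smoke_failed"
-- ===== Notes on version B (the rewrite author's own statement) =====
-- stated objective: alternative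
-- what changed: Replaces five sequential any-scans over the whole list with a single pass that keeps the minimum priority index of each reason's first matching entry in a (predicate,label) table, then looks the label up once.
import Mathlib
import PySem

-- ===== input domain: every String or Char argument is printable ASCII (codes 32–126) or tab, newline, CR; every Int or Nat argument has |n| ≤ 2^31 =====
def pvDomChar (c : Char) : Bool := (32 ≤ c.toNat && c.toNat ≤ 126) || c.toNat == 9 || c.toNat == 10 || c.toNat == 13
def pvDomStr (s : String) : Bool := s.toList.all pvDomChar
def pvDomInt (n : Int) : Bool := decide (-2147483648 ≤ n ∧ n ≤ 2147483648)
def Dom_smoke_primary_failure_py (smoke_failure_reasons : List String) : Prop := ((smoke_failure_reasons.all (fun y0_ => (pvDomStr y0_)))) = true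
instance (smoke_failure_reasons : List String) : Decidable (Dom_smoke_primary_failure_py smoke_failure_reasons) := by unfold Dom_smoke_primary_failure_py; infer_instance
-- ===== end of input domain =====

-- B replaces A's five sequential any-scans by one pass keeping the minimum priority index
-- of each reason's first matching (predicate,label) pair; objective: alternative decomposition.

-- ===== PORT A =====
def smoke_primary_failure_py (smoke_failure_reasons : List String) : String :=
  if smoke_failure_reasons.any (fun reason => PySem.Str.startswith reason "boundary_smoke:boundary_f1_too_low") then
    "boundary_transfer_weak"
  else if smoke_failure_reasons.any (fun reason => PySem.Str.startswith reason "hard_transfer_smoke:gap_too_wide") then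
    "hard_transfer_regression"
  else if smoke_failure_reasons.any (fun reason => PySem.Str.startswith reason "boundary_smoke:gap_too_wide") then
    "boundary_transfer_regression"
  else if smoke_failure_reasons.any (fun reason => PySem.Str.startswith reason "transfer_smoke:gap_too_wide") then
    "transfer_smoke_gap_too_wide"
  else if smoke_failure_reasons.any (fun reason => PySem.Str.endswith reason ":score_below_floor") then
    "transfer_smoke_score_below_floor"
  else
    "transfer_smoke_failed"

-- ===== PORT B =====
-- the priority table _PAIRS of Source B
def pvPairs : List ((String → Bool) × String) :=
  [ (fun r => PySem.Str.startswith r "boundary_smoke:boundary_f1_too_low", "boundary_transfer_weak"),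
    (fun r => PySem.Str.startswith r "hard_transfer_smoke:gap_too_wide", "hard_transfer_regression"),
    (fun r => PySem.Str.startswith r "boundary_smoke:gap_too_wide", "boundary_transfer_regression"),
    (fun r => PySem.Str.startswith r "transfer_smoke:gap_too_wide", "transfer_smoke_gap_too_wide"),
    (fun r => PySem.Str.endswith r ":score_below_floor", "transfer_smoke_score_below_floor") ]

-- the loop of _first_match_index: walk the pairs with a running counter i
def pvFirstMatchGo (reason : String) : List ((String → Bool) × String) → Nat → Nat
  | [], i => i
  | (pred, _label) :: rest, i => if pred reason then i else pvFirstMatchGo reason rest (i + 1)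

def pvFirstMatchIndex (reason : String) : Nat := pvFirstMatchGo reason pvPairs 0

def smoke_primary_failure_py_alt (smoke_failure_reasons : List String) : String :=
  let best := smoke_failure_reasons.foldl
    (fun best reason =>
      let idx := pvFirstMatchIndex reason
      if idx < best then idx else best)
    pvPairs.length
  if h : best < pvPairs.length then (pvPairs.get ⟨best, h⟩).2 else "transfer_smoke_failed"

-- ===== PRECONDITION & SPEC =====
def Spec_smoke_primary_failure_py (smoke_failure_reasons : List String) (out : String) : Prop := out = smoke_primary_failure_py_alt smoke_failure_reasons
instance (smoke_failure_reasons : List String) (out : String) : Decidable (Spec_smoke_primary_failure_py smoke_failure_reasons out) := by unfold Spec_smoke_primary_failure_py; infer_instance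

-- ===== CLAIM (what is proved, stated in full; the proofs are below) =====
def Claim_equal_smoke_primary_failure_py : Prop := ∀ (smoke_failure_reasons : List String), Dom_smoke_primary_failure_py smoke_failure_reasons → Spec_smoke_primary_failure_py smoke_failure_reasons (smoke_primary_failure_py smoke_failure_reasons)

-- ===== LEMMAS AND PROOFS =====

-- abbreviation used only in the proofs: the minimum rank over the list
def pvM (xs : List String) : Nat := xs.foldl (fun b r => min b (pvFirstMatchIndex r)) 5

lemma pvStep_eq :
    (fun (b : Nat) (reason : String) =>
      let idx := pvFirstMatchIndex reason
      if idx < b then idx else b) = (fun b r => min b (pvFirstMatchIndex r)) := by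
  funext b r
  simp only [Nat.min_def]
  split_ifs <;> omega

lemma pvNotAny {p : String → Bool} {xs : List String} (h : ¬ xs.any p = true) :
    ∀ s ∈ xs, ¬ p s = true := fun s hs hp => h (List.any_eq_true.mpr ⟨s, hs, hp⟩)

lemma pvFoldl_min_shift (xs : List String) (b c : ℕ) :
    xs.foldl (fun a r => min a (pvFirstMatchIndex r)) (min b c) =
      min b (xs.foldl (fun a r => min a (pvFirstMatchIndex r)) c) := by
  induction xs generalizing b c with
  | nil => rfl
  | cons a l ih =>
    simp only [List.foldl_cons, min_assoc, ih]

lemma pvM_cons (r : String) (xs : List String) :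
    pvM (r :: xs) = min (pvFirstMatchIndex r) (pvM xs) := by
  have h5 : min 5 (pvFirstMatchIndex r) = min (pvFirstMatchIndex r) 5 := min_comm _ _
  simp only [pvM, List.foldl_cons, h5, pvFoldl_min_shift]

lemma pvM_le_five (xs : List String) : pvM xs ≤ 5 := by
  induction xs with
  | nil => simp [pvM]
  | cons a l ih => rw [pvM_cons]; exact le_trans (min_le_right _ _) ih

lemma pvM_le_iff (xs : List String) (i : ℕ) (hi : i < 5) :
    pvM xs ≤ i ↔ ∃ r ∈ xs, pvFirstMatchIndex r ≤ i := by
  induction xs with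
  | nil => simp [pvM]; omega
  | cons a l ih =>
    rw [pvM_cons, min_le_iff, ih]
    simp [or_and_right, exists_or]

lemma pvRank_le0 (r : String) :
    pvFirstMatchIndex r ≤ 0 ↔ PySem.Str.startswith r "boundary_smoke:boundary_f1_too_low" = true := by
  simp only [pvFirstMatchIndex, pvPairs, pvFirstMatchGo]
  split_ifs <;> simp_all

lemma pvRank_le1 (r : String) :
    pvFirstMatchIndex r ≤ 1 ↔
      (PySem.Str.startswith r "boundary_smoke:boundary_f1_too_low" = true ∨
       PySem.Str.startswith r "hard_transfer_smoke:gap_too_wide" = true) := by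
  simp only [pvFirstMatchIndex, pvPairs, pvFirstMatchGo]
  split_ifs <;> simp_all

lemma pvRank_le2 (r : String) :
    pvFirstMatchIndex r ≤ 2 ↔
      (PySem.Str.startswith r "boundary_smoke:boundary_f1_too_low" = true ∨
       PySem.Str.startswith r "hard_transfer_smoke:gap_too_wide" = true ∨
       PySem.Str.startswith r "boundary_smoke:gap_too_wide" = true) := by
  simp only [pvFirstMatchIndex, pvPairs, pvFirstMatchGo]
  split_ifs <;> simp_all

lemma pvRank_le3 (r : String) :
    pvFirstMatchIndex r ≤ 3 ↔
      (PySem.Str.startswith r "boundary_smoke:boundary_f1_too_low" = true ∨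
       PySem.Str.startswith r "hard_transfer_smoke:gap_too_wide" = true ∨
       PySem.Str.startswith r "boundary_smoke:gap_too_wide" = true ∨
       PySem.Str.startswith r "transfer_smoke:gap_too_wide" = true) := by
  simp only [pvFirstMatchIndex, pvPairs, pvFirstMatchGo]
  split_ifs <;> simp_all

lemma pvRank_le4 (r : String) :
    pvFirstMatchIndex r ≤ 4 ↔
      (PySem.Str.startswith r "boundary_smoke:boundary_f1_too_low" = true ∨
       PySem.Str.startswith r "hard_transfer_smoke:gap_too_wide" = true ∨
       PySem.Str.startswith r "boundary_smoke:gap_too_wide" = true ∨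
       PySem.Str.startswith r "transfer_smoke:gap_too_wide" = true ∨
       PySem.Str.endswith r ":score_below_floor" = true) := by
  simp only [pvFirstMatchIndex, pvPairs, pvFirstMatchGo]
  split_ifs <;> simp_all

lemma pvAlt_eq_table (xs : List String) :
    smoke_primary_failure_py_alt xs =
      if h : pvM xs < pvPairs.length then (pvPairs.get ⟨pvM xs, h⟩).2 else "transfer_smoke_failed" := by
  simp only [smoke_primary_failure_py_alt, pvStep_eq, pvM,
    show pvPairs.length = 5 from by simp [pvPairs]]

-- ===== VERDICT (by name: the statement is the Claim_ definition above) =====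
theorem smoke_primary_failure_py_spec : Claim_equal_smoke_primary_failure_py := by
  intro xs _
  show smoke_primary_failure_py xs = smoke_primary_failure_py_alt xs
  rw [pvAlt_eq_table]
  unfold smoke_primary_failure_py
  by_cases h0 : xs.any (fun r => PySem.Str.startswith r "boundary_smoke:boundary_f1_too_low") = true
  · obtain ⟨r, hr, hp⟩ := List.any_eq_true.mp h0
    have hM : pvM xs = 0 := by
      have := (pvM_le_iff xs 0 (by omega)).mpr ⟨r, hr, (pvRank_le0 r).mpr hp⟩
      omega
    rw [if_pos h0]; simp only [hM]; rfl
  · by_cases h1 : xs.any (fun r => PySem.Str.startswith r "hard_transfer_smoke:gap_too_wide") = true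
    · obtain ⟨r, hr, hp⟩ := List.any_eq_true.mp h1
      have hle : pvM xs ≤ 1 := (pvM_le_iff xs 1 (by omega)).mpr ⟨r, hr, (pvRank_le1 r).mpr (Or.inr hp)⟩
      have hgt : ¬ pvM xs ≤ 0 := by
        rw [pvM_le_iff xs 0 (by omega)]
        rintro ⟨s, hs, hrk⟩
        exact (pvNotAny h0) s hs ((pvRank_le0 s).mp hrk)
      have hM : pvM xs = 1 := by omega
      rw [if_neg h0, if_pos h1]; simp only [hM]; rfl
    · by_cases h2 : xs.any (fun r => PySem.Str.startswith r "boundary_smoke:gap_too_wide") = true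
      · obtain ⟨r, hr, hp⟩ := List.any_eq_true.mp h2
        have hle : pvM xs ≤ 2 :=
          (pvM_le_iff xs 2 (by omega)).mpr ⟨r, hr, (pvRank_le2 r).mpr (Or.inr (Or.inr hp))⟩
        have hgt : ¬ pvM xs ≤ 1 := by
          rw [pvM_le_iff xs 1 (by omega)]
          rintro ⟨s, hs, hrk⟩
          rcases (pvRank_le1 s).mp hrk with h | h
          · exact (pvNotAny h0) s hs h
          · exact (pvNotAny h1) s hs h
        have hM : pvM xs = 2 := by omega
        rw [if_neg h0, if_neg h1, if_pos h2]; simp only [hM]; rfl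
      · by_cases h3 : xs.any (fun r => PySem.Str.startswith r "transfer_smoke:gap_too_wide") = true
        · obtain ⟨r, hr, hp⟩ := List.any_eq_true.mp h3
          have hle : pvM xs ≤ 3 :=
            (pvM_le_iff xs 3 (by omega)).mpr ⟨r, hr, (pvRank_le3 r).mpr (Or.inr (Or.inr (Or.inr hp)))⟩
          have hgt : ¬ pvM xs ≤ 2 := by
            rw [pvM_le_iff xs 2 (by omega)]
            rintro ⟨s, hs, hrk⟩
            rcases (pvRank_le2 s).mp hrk with h | h | h
            · exact (pvNotAny h0) s hs h
            · exact (pvNotAny h1) s hs h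
            · exact (pvNotAny h2) s hs h
          have hM : pvM xs = 3 := by omega
          rw [if_neg h0, if_neg h1, if_neg h2, if_pos h3]; simp only [hM]; rfl
        · by_cases h4 : xs.any (fun r => PySem.Str.endswith r ":score_below_floor") = true
          · obtain ⟨r, hr, hp⟩ := List.any_eq_true.mp h4
            have hle : pvM xs ≤ 4 :=
              (pvM_le_iff xs 4 (by omega)).mpr
                ⟨r, hr, (pvRank_le4 r).mpr (Or.inr (Or.inr (Or.inr (Or.inr hp))))⟩
            have hgt : ¬ pvM xs ≤ 3 := by
              rw [pvM_le_iff xs 3 (by omega)]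
              rintro ⟨s, hs, hrk⟩
              rcases (pvRank_le3 s).mp hrk with h | h | h | h
              · exact (pvNotAny h0) s hs h
              · exact (pvNotAny h1) s hs h
              · exact (pvNotAny h2) s hs h
              · exact (pvNotAny h3) s hs h
            have hM : pvM xs = 4 := by omega
            rw [if_neg h0, if_neg h1, if_neg h2, if_neg h3, if_pos h4]; simp only [hM]; rfl
          · have hgt : ¬ pvM xs ≤ 4 := by
              rw [pvM_le_iff xs 4 (by omega)]
              rintro ⟨s, hs, hrk⟩
              rcases (pvRank_le4 s).mp hrk with h | h | h | h | h
              · exact (pvNotAny h0) s hs h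
              · exact (pvNotAny h1) s hs h
              · exact (pvNotAny h2) s hs h
              · exact (pvNotAny h3) s hs h
              · exact (pvNotAny h4) s hs h
            have hM : pvM xs = 5 := by have := pvM_le_five xs; omega
            rw [if_neg h0, if_neg h1, if_neg h2, if_neg h3, if_neg h4]; simp only [hM]; rfl
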